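-- pv_equiv track=rewrite | github.com/LaienSicet/zvyk_SP_275 | SP_275_v3.py | fy_ro
-- ===== SOURCE A (Python) =====
-- def fy_ro(ro):
--     'таблица страницы 20 21'
--     a_1 = [40000, 39000, 37000, 35000, 33000, 31000, 29000]
--     a_2 = {600 + i * 200: a_1[i] for i in range(6)}
--     for i in a_2:
--         if ro <= i:
--             return a_2[i]
--         if i == 1600:
--             return 29000
-- ===== SOURCE B (Python) =====
-- def fy_ro(ro):
--     'таблица страницы 20 21: binary search over the ascending threshold table'
--     thresholds = [600, 800, 1000, 1200, 1400, 1600]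
--     values = [40000, 39000, 37000, 35000, 33000, 31000]
--     lo, hi = 0, 6
--     while lo < hi:
--         mid = (lo + hi) // 2
--         if thresholds[mid] < ro:
--             lo = mid + 1
--         else:
--             hi = mid
--     return values[lo] if lo < 6 else 29000
-- ===== Notes on version B (the rewrite author's own statement) =====
-- stated objective: alternative
-- what changed: Replaces A's dict comprehension plus linear scan over the keys (with an in-loop 1600 sentinel check) by a binary search (bisect_left-style while loop) over two parallel ascending literal lists.
import Mathlib
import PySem

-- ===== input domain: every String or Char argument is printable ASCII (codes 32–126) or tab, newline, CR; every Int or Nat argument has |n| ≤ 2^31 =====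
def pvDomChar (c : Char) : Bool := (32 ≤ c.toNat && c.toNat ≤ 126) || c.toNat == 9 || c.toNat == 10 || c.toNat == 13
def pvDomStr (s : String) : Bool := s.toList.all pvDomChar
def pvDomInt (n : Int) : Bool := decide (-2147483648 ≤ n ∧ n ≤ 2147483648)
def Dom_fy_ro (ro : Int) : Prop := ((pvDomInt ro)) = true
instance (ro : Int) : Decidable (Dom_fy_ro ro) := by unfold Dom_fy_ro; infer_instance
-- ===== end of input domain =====

-- B replaces A's linear scan over a dict comprehension by a binary search over two
-- parallel ascending literal lists (objective: alternative/idiomatic; same tiny cost).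

-- ===== PORT A =====
-- the for-loop over the dict's keys, with its two early returns
def fy_ro_loop (ro : Int) (a_2 : PySem.Dict Int Int) : List Int → Option Int
  | [] => none
  | i :: rest =>
    if ro ≤ i then a_2.get? i
    else if i == 1600 then some 29000
    else fy_ro_loop ro a_2 rest

def fy_ro (ro : Int) : Int :=
  let a_1 : List Int := [40000, 39000, 37000, 35000, 33000, 31000, 29000]
  let a_2 : PySem.Dict Int Int :=
    (PySem.List.pyRange 0 6 1).foldl
      (fun d i => d.insert (600 + i * 200) ((PySem.List.pyGet? a_1 i).getD 0)) PySem.Dict.empty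
  -- Python's loop always returns (the last key is 1600), so the .getD 0 is unreachable
  (fy_ro_loop ro a_2 a_2.keys).getD 0

-- ===== PORT B =====
-- the while-loop of Source B; terminates because hi - lo shrinks
-- fuel = hi - lo bounds the iterations of the while-loop (6 suffices and is exact here)
def fy_ro_bsearch (thresholds : List Int) (ro : Int) : Nat → Nat → Nat → Nat
  | 0, lo, _ => lo
  | fuel + 1, lo, hi =>
    if lo < hi then
      let mid := (lo + hi) / 2
      if (PySem.List.pyGet? thresholds (mid : Int)).getD 0 < ro then
        fy_ro_bsearch thresholds ro fuel (mid + 1) hi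
      else
        fy_ro_bsearch thresholds ro fuel lo mid
    else lo

def fy_ro_alt (ro : Int) : Int :=
  let thresholds : List Int := [600, 800, 1000, 1200, 1400, 1600]
  let values : List Int := [40000, 39000, 37000, 35000, 33000, 31000]
  let lo := fy_ro_bsearch thresholds ro 6 0 6
  if lo < 6 then (PySem.List.pyGet? values (lo : Int)).getD 0 else 29000

-- ===== PRECONDITION & SPEC =====
def Spec_fy_ro (ro : Int) (out : Int) : Prop := out = fy_ro_alt ro
instance (ro : Int) (out : Int) : Decidable (Spec_fy_ro ro out) := by unfold Spec_fy_ro; infer_instance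

-- ===== CLAIM (what is proved, stated in full; the proofs are below) =====
def Claim_equal_fy_ro : Prop := ∀ (ro : Int), Dom_fy_ro ro → Spec_fy_ro ro (fy_ro ro)

-- ===== LEMMAS AND PROOFS =====
-- A's result as a closed chain of interval tests
lemma fy_ro_closed (ro : Int) :
    fy_ro ro = (if ro ≤ 600 then 40000 else if ro ≤ 800 then 39000 else
                if ro ≤ 1000 then 37000 else if ro ≤ 1200 then 35000 else
                if ro ≤ 1400 then 33000 else if ro ≤ 1600 then 31000 else 29000) := by
  have hd : ((PySem.List.pyRange 0 6 1).foldl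
      (fun d i => d.insert (600 + i * 200)
        ((PySem.List.pyGet? ([40000, 39000, 37000, 35000, 33000, 31000, 29000] : List Int) i).getD 0))
      PySem.Dict.empty)
      = PySem.Dict.mk [(600, 40000), (800, 39000), (1000, 37000), (1200, 35000),
                       (1400, 33000), (1600, 31000)] := by decide
  simp only [fy_ro, hd]
  simp [fy_ro_loop, PySem.Dict.keys, PySem.Dict.get?]
  split_ifs <;> simp_all

-- B's result as the same chain
set_option maxHeartbeats 4000000 in
lemma fy_ro_alt_closed (ro : Int) :
    fy_ro_alt ro = (if ro ≤ 600 then 40000 else if ro ≤ 800 then 39000 else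
                if ro ≤ 1000 then 37000 else if ro ≤ 1200 then 35000 else
                if ro ≤ 1400 then 33000 else if ro ≤ 1600 then 31000 else 29000) := by
  simp only [fy_ro_alt]
  simp only [fy_ro_bsearch]
  norm_num [PySem.List.pyGet?, PySem.List.pyIdx?]
  split_ifs <;> simp_all <;> omega

-- ===== VERDICT (by name: the statement is the Claim_ definition above) =====
theorem fy_ro_spec : Claim_equal_fy_ro := by
  intro ro _
  unfold Spec_fy_ro
  rw [fy_ro_closed, fy_ro_alt_closed]
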